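-- pv_equiv track=rewrite | github.com/kaushiklj/python_scripts | reactant_reactions.py | compare_backward_reactions
-- ===== SOURCE A (Python) =====
-- def compare_backward_reactions(r1,p1,r2,p2):
--     #negative value means reactions dont match
--     #positive value means reactions match
--     nr1 = len(r1)
--     np1 = len(p1)
--
--     nr2 = len(p2)
--     np2 = len(r2)
--
--     rflag = [None]* nr1
--     pflag = [None]* np1
--
--     for i1 in range(0,nr1):
--         rflag[i1] = 0
--     for i1 in range(0,np1):
--         pflag[i1] = 0
--
--     if (nr1 != nr2 or np1 != np2):
--         return -10
--
--     #Start comparing reactants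
--     count1 = 0
--     for i1 in range(0,nr1):
--         for i2 in range(0,nr2):
--             if (r1[i1] == p2[i2] and rflag[i2] == 0):
--                 count1 = count1 + 1
--                 rflag[i2] = 1
--                 break
--
--     #Start comparing products
--     count2 = 0
--     for i1 in range(0,np1):
--         for i2 in range(0,np2):
--             if (p1[i1] == r2[i2] and pflag[i2] == 0):
--                 count2 = count2 + 1
--                 pflag[i2] = 1
--                 break
--
--     #Check if the reactions match
--     if (count1 == nr1 and count2 == np1):
--         return 10
--     else:
--         return -10
-- ===== SOURCE B (Python) =====
-- def compare_backward_reactions(r1, p1, r2, p2):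
--     # negative value means reactions dont match, positive means they match
--     if len(r1) != len(p2) or len(p1) != len(r2):
--         return -10
--     if sorted(r1) == sorted(p2) and sorted(p1) == sorted(r2):
--         return 10
--     return -10
-- ===== Notes on version B (the rewrite author's own statement) =====
-- stated objective: faster
-- what changed: Replaces the greedy O(n^2) flag-based pairwise matching with a length guard plus sort-then-compare of the two cross pairs (r1 vs p2, p1 vs r2).
import Mathlib
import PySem

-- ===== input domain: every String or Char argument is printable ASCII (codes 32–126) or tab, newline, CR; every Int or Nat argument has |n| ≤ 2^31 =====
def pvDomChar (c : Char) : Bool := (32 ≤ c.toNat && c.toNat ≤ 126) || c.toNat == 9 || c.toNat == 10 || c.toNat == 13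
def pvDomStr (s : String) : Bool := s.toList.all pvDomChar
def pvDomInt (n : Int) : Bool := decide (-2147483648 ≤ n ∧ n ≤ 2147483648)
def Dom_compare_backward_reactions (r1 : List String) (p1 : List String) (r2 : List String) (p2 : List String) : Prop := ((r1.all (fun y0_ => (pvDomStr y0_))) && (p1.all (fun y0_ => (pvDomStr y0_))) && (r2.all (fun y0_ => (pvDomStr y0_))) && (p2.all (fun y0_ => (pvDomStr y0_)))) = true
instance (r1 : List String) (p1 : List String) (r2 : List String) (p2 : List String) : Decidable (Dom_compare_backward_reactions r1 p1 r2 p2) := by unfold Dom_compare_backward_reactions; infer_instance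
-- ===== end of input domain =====

-- B replaces A's greedy O(n^2) flag-based matching with a length guard plus sort-then-compare: O(n log n) vs O(n^2), measured faster in a timing run.

-- ===== PORT A =====
-- inner `for i2 ... break` loop: scan ys and flags left-to-right; at the first
-- position with ys[i2] == x and flag[i2] == 0 set the flag to 1 and stop (some),
-- otherwise report no match (none).
def aFind (x : String) : List String → List Int → Option (List Int)
  | y :: ys, f :: fs =>
    if y = x ∧ f = 0 then some (1 :: fs)
    else (aFind x ys fs).map (fun fs' => f :: fs')
  | _, _ => none

-- one outer-loop iteration: on a hit increment the count and keep the updated flags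
def aStep (ys : List String) (cf : Int × List Int) (x : String) : Int × List Int :=
  match aFind x ys cf.2 with
  | some fs' => (cf.1 + 1, fs')
  | none => cf

def compare_backward_reactions (r1 : List String) (p1 : List String) (r2 : List String) (p2 : List String) : Int :=
  let nr1 := r1.length
  let np1 := p1.length
  let nr2 := p2.length
  let np2 := r2.length
  let rflag := List.replicate nr1 (0 : Int)
  let pflag := List.replicate np1 (0 : Int)
  if nr1 ≠ nr2 ∨ np1 ≠ np2 then -10
  else
    let s1 := r1.foldl (aStep p2) ((0 : Int), rflag)
    let s2 := p1.foldl (aStep r2) ((0 : Int), pflag)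
    if s1.1 = (nr1 : Int) ∧ s2.1 = (np1 : Int) then 10 else -10

-- ===== PORT B =====
def compare_backward_reactions_alt (r1 : List String) (p1 : List String) (r2 : List String) (p2 : List String) : Int :=
  if r1.length ≠ p2.length ∨ p1.length ≠ r2.length then -10
  else if (PySem.List.sorted r1 (fun x => x) = PySem.List.sorted p2 (fun x => x)) ∧
          (PySem.List.sorted p1 (fun x => x) = PySem.List.sorted r2 (fun x => x)) then 10
  else -10

-- ===== PRECONDITION & SPEC =====
def Spec_compare_backward_reactions (r1 : List String) (p1 : List String) (r2 : List String) (p2 : List String) (out : Int) : Prop := out = compare_backward_reactions_alt r1 p1 r2 p2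
instance (r1 : List String) (p1 : List String) (r2 : List String) (p2 : List String) (out : Int) : Decidable (Spec_compare_backward_reactions r1 p1 r2 p2 out) := by unfold Spec_compare_backward_reactions; infer_instance

-- ===== CLAIM (what is proved, stated in full; the proofs are below) =====
def Claim_equal_compare_backward_reactions : Prop := ∀ (r1 : List String) (p1 : List String) (r2 : List String) (p2 : List String), Dom_compare_backward_reactions r1 p1 r2 p2 → Spec_compare_backward_reactions r1 p1 r2 p2 (compare_backward_reactions r1 p1 r2 p2)

-- ===== LEMMAS AND PROOFS =====

-- the multiset of still-unflagged elements of ys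
def rem : List String → List Int → List String
  | y :: ys, f :: fs => if f = 0 then y :: rem ys fs else rem ys fs
  | _, _ => []

lemma rem_replicate_zero (ys : List String) : rem ys (List.replicate ys.length 0) = ys := by
  induction ys with
  | nil => rfl
  | cons y ys ih => simp [rem, List.replicate, ih]

lemma aStep_none {x : String} {ys : List String} {fs : List Int} (c : Int)
    (h : aFind x ys fs = none) : aStep ys (c, fs) x = (c, fs) := by
  simp [aStep, h]

lemma aStep_some {x : String} {ys : List String} {fs fs' : List Int} (c : Int)
    (h : aFind x ys fs = some fs') : aStep ys (c, fs) x = (c + 1, fs') := by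
  simp [aStep, h]

lemma aFind_none {x : String} {ys : List String} {fs : List Int}
    (h : aFind x ys fs = none) : x ∉ rem ys fs := by
  induction ys generalizing fs with
  | nil => cases fs <;> simp [rem]
  | cons y ys ih =>
    cases fs with
    | nil => simp [rem]
    | cons f fs =>
      by_cases hc : y = x ∧ f = 0
      · simp [aFind, hc] at h
      · simp [aFind, hc] at h
        by_cases hf : f = 0
        · have hyx : y ≠ x := fun hy => hc ⟨hy, hf⟩
          simp [rem, hf, hyx.symm]
          exact ih h
        · simpa [rem, hf] using ih h

lemma aFind_some {x : String} {ys : List String} {fs fs' : List Int}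
    (h : aFind x ys fs = some fs') :
    x ∈ rem ys fs ∧ rem ys fs' = (rem ys fs).erase x := by
  induction ys generalizing fs fs' with
  | nil => cases fs <;> simp [aFind] at h
  | cons y ys ih =>
    cases fs with
    | nil => simp [aFind] at h
    | cons f fs =>
      by_cases hc : y = x ∧ f = 0
      · obtain ⟨rfl, rfl⟩ := hc
        simp [aFind] at h
        subst h
        simp [rem]
      · simp [aFind, hc] at h
        obtain ⟨g, hg, rfl⟩ := h
        obtain ⟨hm, hr⟩ := ih hg
        by_cases hf : f = 0
        · subst hf
          have hyx : y ≠ x := fun hy => hc ⟨hy, rfl⟩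
          refine ⟨by simp [rem]; right; exact hm, ?_⟩
          simp [rem, hyx]
          exact hr
        · exact ⟨by simpa [rem, hf] using hm, by simpa [rem, hf] using hr⟩

-- count never exceeds the number of elements processed
lemma foldl_aStep_le (ys : List String) (xs : List String) (c : Int) (fs : List Int) :
    (xs.foldl (aStep ys) (c, fs)).1 ≤ c + xs.length := by
  induction xs generalizing c fs with
  | nil => simp
  | cons x xs ih =>
    simp only [List.foldl_cons, List.length_cons]
    cases h : aFind x ys fs with
    | none =>
      rw [aStep_none c h]
      have := ih c fs
      push_cast at this ⊢
      omega
    | some fs' =>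
      rw [aStep_some c h]
      have := ih (c + 1) fs'
      push_cast at this ⊢
      omega

lemma subperm_iff_count (l₁ l₂ : List String) :
    List.Subperm l₁ l₂ ↔ ∀ a, l₁.count a ≤ l₂.count a := by
  rw [List.subperm_ext_iff]
  constructor
  · intro h a
    by_cases ha : a ∈ l₁
    · exact h a ha
    · simp [List.count_eq_zero_of_not_mem ha]
  · intro h a _
    exact h a

lemma cons_subperm_erase (x : String) (l xs : List String) (h : x ∈ l) :
    List.Subperm (x :: xs) l ↔ List.Subperm xs (l.erase x) := by
  rw [subperm_iff_count, subperm_iff_count]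
  have hx : 1 ≤ List.count x l := List.count_pos_iff.mpr h
  constructor
  · intro hc a
    have := hc a
    rw [List.count_erase]
    simp only [List.count_cons] at this
    by_cases hax : a = x
    · subst hax
      simp at this ⊢
      omega
    · simp [Ne.symm hax] at this ⊢
      exact this
  · intro hc a
    have := hc a
    rw [List.count_erase] at this
    simp only [List.count_cons]
    by_cases hax : a = x
    · subst hax
      simp at this ⊢
      omega
    · simp [Ne.symm hax] at this ⊢
      exact this

lemma not_cons_subperm {x : String} {l xs : List String} (h : x ∉ l) :
    ¬ List.Subperm (x :: xs) l := fun hs => h (hs.subset (List.mem_cons_self ..))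

-- the greedy loop reaches full count exactly when xs fits (as a multiset) in the
-- unflagged part of ys
lemma foldl_aStep_full (ys : List String) (xs : List String) (c : Int) (fs : List Int) :
    (xs.foldl (aStep ys) (c, fs)).1 = c + xs.length ↔ List.Subperm xs (rem ys fs) := by
  induction xs generalizing c fs with
  | nil => simp [List.nil_subperm]
  | cons x xs ih =>
    simp only [List.foldl_cons, List.length_cons]
    cases h : aFind x ys fs with
    | none =>
      rw [aStep_none c h]
      have hle := foldl_aStep_le ys xs c fs
      have hm := aFind_none h
      constructor
      · intro he
        exfalso
        push_cast at he hle
        omega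
      · intro hs
        exact absurd hs (not_cons_subperm hm)
    | some fs' =>
      rw [aStep_some c h]
      obtain ⟨hm, hr⟩ := aFind_some h
      have hih := ih (c + 1) fs'
      rw [hr] at hih
      rw [cons_subperm_erase x _ xs hm, ← hih]
      constructor <;> intro he <;> push_cast at he ⊢ <;> omega

-- full count at equal lengths is exactly multiset equality, i.e. sorted equality
lemma full_iff_sorted (xs ys : List String) (hlen : xs.length = ys.length) :
    (xs.foldl (aStep ys) ((0 : Int), List.replicate ys.length 0)).1 = (ys.length : Int) ↔
      PySem.List.sorted xs (fun x => x) = PySem.List.sorted ys (fun x => x) := by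
  have h0 : ((ys.length : Int)) = 0 + (xs.length : Int) := by rw [hlen]; omega
  rw [h0, foldl_aStep_full, rem_replicate_zero,
      PySem.List.sorted_id_eq_sorted_id_iff_perm]
  constructor
  · intro hs
    exact hs.perm_of_length_le (by omega)
  · intro hp
    exact hp.subperm

-- ===== VERDICT (by name: the statement is the Claim_ definition above) =====
theorem compare_backward_reactions_spec : Claim_equal_compare_backward_reactions := by
  intro r1 p1 r2 p2 _
  unfold Spec_compare_backward_reactions
  simp only [compare_backward_reactions, compare_backward_reactions_alt]
  by_cases hg : r1.length ≠ p2.length ∨ p1.length ≠ r2.length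
  · rw [if_pos hg, if_pos hg]
  · rw [if_neg hg, if_neg hg]
    have h1 : r1.length = p2.length := by tauto
    have h2 : p1.length = r2.length := by tauto
    rw [h1, h2]
    simp only [full_iff_sorted r1 p2 h1, full_iff_sorted p1 r2 h2]
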